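-- pv_equiv track=rewrite | github.com/Ayumudayo/Dynaxis | scripts/generate_k8s_topology.py | sanitize_kubernetes_name_token
-- ===== SOURCE A (Python) =====
-- def sanitize_kubernetes_name_token(value: str) -> str:
--     lowered = [ch.lower() if ch.isalnum() else "-" for ch in value]
--     collapsed: list[str] = []
--     previous_dash = False
--     for ch in lowered:
--         if ch == "-":
--             if not previous_dash:
--                 collapsed.append(ch)
--             previous_dash = True
--             continue
--         collapsed.append(ch)
--         previous_dash = False
--
--     while collapsed and collapsed[0] == "-":
--         collapsed.pop(0)
--     while collapsed and collapsed[-1] == "-":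
--         collapsed.pop()
--
--     return "".join(collapsed) or "pool"
-- ===== SOURCE B (Python) =====
-- def sanitize_kubernetes_name_token(value: str) -> str:
--     s = "".join(ch.lower() if ch.isalnum() else "-" for ch in value)
--     parts = [p for p in s.split("-") if p]
--     return "-".join(parts) or "pool"
-- ===== Notes on version B (the rewrite author's own statement) =====
-- stated objective: simpler
-- what changed: Replaced the previous_dash state machine plus the two pop-loops by tokenizing: split the mapped string on '-' and drop empty pieces, which collapses dash runs and strips leading/trailing dashes in one step.
import Mathlib
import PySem

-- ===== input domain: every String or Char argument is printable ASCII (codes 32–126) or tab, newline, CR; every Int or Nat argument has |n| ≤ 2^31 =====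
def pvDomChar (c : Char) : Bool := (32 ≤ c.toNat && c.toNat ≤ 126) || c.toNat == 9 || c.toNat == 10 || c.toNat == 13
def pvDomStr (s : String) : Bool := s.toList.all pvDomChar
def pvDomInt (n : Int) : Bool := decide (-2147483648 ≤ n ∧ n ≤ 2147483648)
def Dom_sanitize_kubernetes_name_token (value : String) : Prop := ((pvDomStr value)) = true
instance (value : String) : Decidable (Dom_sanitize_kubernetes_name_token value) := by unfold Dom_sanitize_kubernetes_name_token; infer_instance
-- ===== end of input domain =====

-- B replaces A's previous_dash state machine and two pop-loops by splitting the mapped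
-- string on '-' and dropping empty pieces (simpler decomposition, same result).

-- ===== PORT A =====
-- one step of A's for-loop over state (collapsed, previous_dash)
def pvStepA (st : List Char × Bool) (ch : Char) : List Char × Bool :=
  if ch = '-' then
    (if st.2 then st.1 else st.1 ++ [ch], true)
  else
    (st.1 ++ [ch], false)

def sanitize_kubernetes_name_token (value : String) : String :=
  let lowered := value.toList.map (fun ch => if PySem.Chars.isalnum ch then PySem.Chars.lowerChar ch else '-')
  let st := lowered.foldl pvStepA ([], false)
  let collapsed1 := (st.1).dropWhile (fun c => c == '-')                  -- while collapsed and collapsed[0] == "-": pop(0)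
  let collapsed2 := (collapsed1.reverse.dropWhile (fun c => c == '-')).reverse  -- while collapsed and collapsed[-1] == "-": pop()
  if collapsed2.isEmpty then "pool" else String.ofList collapsed2             -- "".join(collapsed) or "pool"

-- ===== PORT B =====
def sanitize_kubernetes_name_token_alt (value : String) : String :=
  let s := value.toList.map (fun ch => if PySem.Chars.isalnum ch then PySem.Chars.lowerChar ch else '-')
  let parts := (PySem.Chars.splitOn s ['-']).filter (fun p => !p.isEmpty)  -- [p for p in s.split("-") if p]
  let joined := PySem.Chars.join ['-'] parts
  if joined.isEmpty then "pool" else String.ofList joined                      -- "-".join(parts) or "pool"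

-- ===== PRECONDITION & SPEC =====
def Spec_sanitize_kubernetes_name_token (value : String) (out : String) : Prop := out = sanitize_kubernetes_name_token_alt value
instance (value : String) (out : String) : Decidable (Spec_sanitize_kubernetes_name_token value out) := by unfold Spec_sanitize_kubernetes_name_token; infer_instance

-- ===== CLAIM (what is proved, stated in full; the proofs are below) =====
def Claim_equal_sanitize_kubernetes_name_token : Prop := ∀ (value : String), Dom_sanitize_kubernetes_name_token value → Spec_sanitize_kubernetes_name_token value (sanitize_kubernetes_name_token value)

-- ===== LEMMAS AND PROOFS =====

-- forward-recursive form of A's collapsing loop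
def pvCollapse : List Char → Bool → List Char
  | [], _ => []
  | c :: t, prev =>
    if c = '-' then
      (if prev then pvCollapse t true else '-' :: pvCollapse t true)
    else c :: pvCollapse t false

lemma pvFoldl_eq (l : List Char) (acc : List Char) (prev : Bool) :
    (l.foldl pvStepA (acc, prev)).1 = acc ++ pvCollapse l prev := by
  induction l generalizing acc prev with
  | nil => simp [pvCollapse]
  | cons c t ih =>
    by_cases hc : c = '-'
    · subst hc
      cases prev <;> simp [pvStepA, pvCollapse, ih]
    · simp [pvStepA, pvCollapse, hc, ih]

-- trimmers for the two pop-loops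
def pvTrimL (xs : List Char) : List Char := xs.dropWhile (fun c => c == '-')
def pvTrimR (xs : List Char) : List Char := (xs.reverse.dropWhile (fun c => c == '-')).reverse

-- structural specification of splitOn for a single-char separator
def pvSplit : List Char → List (List Char)
  | [] => [[]]
  | c :: t =>
    if c = '-' then [] :: pvSplit t
    else
      match pvSplit t with
      | [] => [[c]]          -- unreachable: pvSplit never returns []
      | p :: ps => (c :: p) :: ps

lemma pvSplit_ne_nil (s : List Char) : pvSplit s ≠ [] := by
  cases s with
  | nil => simp [pvSplit]
  | cons c t =>
    simp only [pvSplit]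
    split <;> simp_all
    split <;> simp

lemma pvGo_eq (fuel : Nat) (l cur : List Char) (acc : List (List Char)) (h : l.length ≤ fuel) :
    PySem.Chars.splitOn.go ['-'] fuel l cur acc =
      acc.reverse ++ (match pvSplit l with
        | [] => [cur.reverse]
        | p :: ps => (cur.reverse ++ p) :: ps) := by
  induction fuel generalizing l cur acc with
  | zero =>
    have : l = [] := by
      cases l with
      | nil => rfl
      | cons c t => simp at h
    subst this
    simp [PySem.Chars.splitOn.go, pvSplit]
  | succ fuel ih =>
    cases l with
    | nil => simp [PySem.Chars.splitOn.go, pvSplit]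
    | cons c t =>
      by_cases hc : c = '-'
      · subst hc
        rw [PySem.Chars.splitOn.go]
        have hpre : List.isPrefixOf ['-'] ('-' :: t) = true := by
          simp [List.isPrefixOf]
        rw [if_pos hpre]
        have ht : t.length ≤ fuel := by simpa using h
        rw [show List.drop ['-'].length ('-' :: t) = t from rfl]
        rw [ih _ _ _ ht]
        rcases hsp : pvSplit t with _ | ⟨p, ps⟩
        · exact absurd hsp (pvSplit_ne_nil t)
        · simp [pvSplit, hsp]
      · rw [PySem.Chars.splitOn.go]
        have hpre : List.isPrefixOf ['-'] (c :: t) = false := by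
          simp [List.isPrefixOf]
          exact fun hh => absurd hh.symm hc
        rw [if_neg (by simp [hpre])]
        have ht : t.length ≤ fuel := by simpa using Nat.le_of_succ_le_succ (by simpa using h)
        rw [ih _ _ _ ht]
        rcases hsp : pvSplit t with _ | ⟨p, ps⟩
        · exact absurd hsp (pvSplit_ne_nil t)
        · simp [pvSplit, hc, hsp]

lemma pvSplitOn_eq (s : List Char) : PySem.Chars.splitOn s ['-'] = pvSplit s := by
  unfold PySem.Chars.splitOn
  rw [pvGo_eq _ _ _ _ (by omega)]
  rcases hsp : pvSplit s with _ | ⟨p, ps⟩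
  · exact absurd hsp (pvSplit_ne_nil s)
  · simp

-- join with '-' unfolded one cons
lemma pvJoin_cons (x : List Char) (ps : List (List Char)) :
    PySem.Chars.join ['-'] (x :: ps) =
      x ++ (if ps.isEmpty then [] else '-' :: PySem.Chars.join ['-'] ps) := by
  cases ps with
  | nil => simp [PySem.Chars.join_singleton]
  | cons q qs => rw [PySem.Chars.join_cons_cons]; simp

def pvG (s : List Char) : List Char :=
  PySem.Chars.join ['-'] ((pvSplit s).filter (fun p => !p.isEmpty))

lemma pvJoin_filter_ne_nil (L : List (List Char)) (h : L.filter (fun p => !p.isEmpty) ≠ []) :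
    PySem.Chars.join ['-'] (L.filter (fun p => !p.isEmpty)) ≠ [] := by
  rcases hf : L.filter (fun p => !p.isEmpty) with _ | ⟨p, ps⟩
  · exact absurd hf h
  · have hp : p ≠ [] := by
      have := List.of_mem_filter (a := p) (l := L) (by rw [hf]; exact List.mem_cons_self)
      simpa [List.isEmpty_iff] using this
    rw [hf, pvJoin_cons]
    simp [hp]

lemma pvG_nil : pvG [] = [] := by
  simp [pvG, pvSplit, PySem.Chars.join_nil]

lemma pvG_dash (t : List Char) : pvG ('-' :: t) = pvG t := by
  simp [pvG, pvSplit]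

lemma pvG_eq_nil_iff (u : List Char) :
    pvG u = [] ↔ (pvSplit u).filter (fun p => !p.isEmpty) = [] := by
  constructor
  · intro h
    by_contra hne
    exact pvJoin_filter_ne_nil (pvSplit u) hne (by simpa [pvG] using h)
  · intro h
    simp [pvG, h, PySem.Chars.join_nil]

lemma pvG_single (c : Char) (hc : c ≠ '-') : pvG [c] = [c] := by
  simp [pvG, pvSplit, hc, PySem.Chars.join_singleton]

lemma pvG_cons_dash (c : Char) (hc : c ≠ '-') (u : List Char) :
    pvG (c :: '-' :: u) = c :: (if pvG u = [] then [] else '-' :: pvG u) := by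
  have hsp : pvSplit (c :: '-' :: u) = [c] :: pvSplit u := by
    simp [pvSplit, hc]
  by_cases h : (pvSplit u).filter (fun p => !p.isEmpty) = []
  · have hg : pvG u = [] := (pvG_eq_nil_iff u).2 h
    rw [pvG, hsp, List.filter_cons]
    simp only [List.isEmpty_cons, Bool.not_false, if_pos]
    rw [pvJoin_cons]
    simp [h, hg]
  · have hg : pvG u ≠ [] := fun hh => h ((pvG_eq_nil_iff u).1 hh)
    have hne : ((pvSplit u).filter (fun p => !p.isEmpty)).isEmpty = false := by
      simpa [List.isEmpty_iff] using h
    rw [pvG, hsp, List.filter_cons]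
    simp only [List.isEmpty_cons, Bool.not_false, if_pos]
    rw [pvJoin_cons, if_neg hg]
    simp [hne, pvG]

lemma pvG_cons_cons (c d : Char) (hc : c ≠ '-') (hd : d ≠ '-') (u : List Char) :
    pvG (c :: d :: u) = c :: pvG (d :: u) := by
  rcases hq : pvSplit u with _ | ⟨q, qs⟩
  · exact absurd hq (pvSplit_ne_nil u)
  · have h1 : pvSplit (d :: u) = (d :: q) :: qs := by simp [pvSplit, hd, hq]
    have h2 : pvSplit (c :: d :: u) = (c :: d :: q) :: qs := by simp [pvSplit, hc, hd, hq]
    rw [pvG, pvG, h1, h2, List.filter_cons, List.filter_cons]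
    simp only [List.isEmpty_cons, Bool.not_false, if_pos]
    rw [pvJoin_cons, pvJoin_cons]
    simp

-- the collapsed list with start-state true is empty or starts with a non-dash
lemma pvCollapse_true_head (u : List Char) :
    pvCollapse u true = [] ∨ ∃ d r, pvCollapse u true = d :: r ∧ d ≠ '-' := by
  induction u with
  | nil => left; rfl
  | cons c t ih =>
    by_cases hc : c = '-'
    · subst hc; simpa [pvCollapse] using ih
    · right; exact ⟨c, pvCollapse t false, by simp [pvCollapse, hc], hc⟩

lemma pvTrimR_cons_ne (c : Char) (hc : c ≠ '-') (ys : List Char) :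
    pvTrimR (c :: ys) = c :: pvTrimR ys := by
  unfold pvTrimR
  rw [List.reverse_cons, List.dropWhile_append]
  by_cases h : ys.reverse.dropWhile (fun c => c == '-') = []
  · simp [h, hc]
  · simp [h]

lemma pvTrimR_cons_dash (ys : List Char) :
    pvTrimR ('-' :: ys) = if pvTrimR ys = [] then [] else '-' :: pvTrimR ys := by
  unfold pvTrimR
  rw [List.reverse_cons, List.dropWhile_append]
  by_cases h : ys.reverse.dropWhile (fun c => c == '-') = []
  · simp [h]
  · simp [h]

-- main lemma: trimming A's collapsed list (start-state true) = B's join-of-nonempty-splits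
lemma pvMain (s : List Char) : pvTrimR (pvCollapse s true) = pvG s := by
  cases s with
  | nil => simp [pvCollapse, pvTrimR, pvG_nil]
  | cons c t =>
    by_cases hc : c = '-'
    · subst hc
      have ih := pvMain t
      simp only [pvCollapse, if_pos]
      rw [ih, pvG_dash]
    · simp only [pvCollapse, if_neg hc]
      cases t with
      | nil =>
        rw [show pvCollapse [] false = [] from rfl, pvTrimR_cons_ne c hc, pvG_single c hc]
        simp [pvTrimR]
      | cons d u =>
        by_cases hd : d = '-'
        · subst hd
          have ih := pvMain u
          have hcol : pvCollapse ('-' :: u) false = '-' :: pvCollapse u true := by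
            simp [pvCollapse]
          rw [hcol, pvTrimR_cons_ne c hc, pvTrimR_cons_dash, ih, pvG_cons_dash c hc]
        · have ih := pvMain (d :: u)
          have hcol : pvCollapse (d :: u) false = pvCollapse (d :: u) true := by
            simp [pvCollapse, hd]
          rw [hcol, pvTrimR_cons_ne c hc, ih, pvG_cons_cons c d hc hd]
termination_by s.length
decreasing_by all_goals simp

-- bridge from A's start-state false + leading trim to start-state true
lemma pvTrimL_collapse (t : List Char) : pvTrimL (pvCollapse t false) = pvCollapse t true := by
  have htrue : pvTrimL (pvCollapse t true) = pvCollapse t true := by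
    rcases pvCollapse_true_head t with h | ⟨d, r, h, hd⟩
    · rw [h]; rfl
    · rw [h]; unfold pvTrimL; rw [List.dropWhile_cons_of_neg (by simp [hd])]
  cases t with
  | nil => rfl
  | cons c u =>
    by_cases hc : c = '-'
    · subst hc
      have : pvCollapse ('-' :: u) false = '-' :: pvCollapse ('-' :: u) true := by
        simp [pvCollapse]
      rw [this]
      unfold pvTrimL
      rw [List.dropWhile_cons_of_pos (by simp)]
      exact htrue
    · have : pvCollapse (c :: u) false = pvCollapse (c :: u) true := by
        simp [pvCollapse, hc]
      rw [this]; exact htrue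

-- ===== VERDICT (by name: the statement is the Claim_ definition above) =====
theorem sanitize_kubernetes_name_token_spec : Claim_equal_sanitize_kubernetes_name_token := by
  intro value _
  unfold Spec_sanitize_kubernetes_name_token sanitize_kubernetes_name_token sanitize_kubernetes_name_token_alt
  simp only []
  set s := value.toList.map (fun ch => if PySem.Chars.isalnum ch then PySem.Chars.lowerChar ch else '-') with hs
  have h1 : (s.foldl pvStepA ([], false)).1 = pvCollapse s false := by
    simpa using pvFoldl_eq s [] false
  have h2 : ((((s.foldl pvStepA ([], false)).1).dropWhile (fun c => c == '-')).reverse.dropWhile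
      (fun c => c == '-')).reverse = pvG s := by
    rw [h1]
    have : ((pvCollapse s false).dropWhile (fun c => c == '-')) = pvCollapse s true :=
      pvTrimL_collapse s
    rw [this]
    exact pvMain s
  rw [h2, pvSplitOn_eq]
  rfl
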